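-- pv_equiv track=rewrite | github.com/sofiSerrano/Adventcode2021 | Day3/day3.py | cumpleCondicion
-- ===== SOURCE A (Python) =====
-- def cumpleCondicion(minlist,pos,num):
--     band=False
--     i=0
--     while i < len(minlist) and band==False:
--         if minlist[i]==num and i==pos:
--             band=True
--         i=i+1
--     return band
-- ===== SOURCE B (Python) =====
-- def cumpleCondicion(minlist, pos, num):
--     return 0 <= pos < len(minlist) and minlist[pos] == num
-- ===== Notes on version B (the rewrite author's own statement) =====
-- stated objective: simpler
-- what changed: Replaces the while-loop/boolean-flag scan with a single guarded direct index access: pos in range and minlist[pos] == num.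
import Mathlib
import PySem

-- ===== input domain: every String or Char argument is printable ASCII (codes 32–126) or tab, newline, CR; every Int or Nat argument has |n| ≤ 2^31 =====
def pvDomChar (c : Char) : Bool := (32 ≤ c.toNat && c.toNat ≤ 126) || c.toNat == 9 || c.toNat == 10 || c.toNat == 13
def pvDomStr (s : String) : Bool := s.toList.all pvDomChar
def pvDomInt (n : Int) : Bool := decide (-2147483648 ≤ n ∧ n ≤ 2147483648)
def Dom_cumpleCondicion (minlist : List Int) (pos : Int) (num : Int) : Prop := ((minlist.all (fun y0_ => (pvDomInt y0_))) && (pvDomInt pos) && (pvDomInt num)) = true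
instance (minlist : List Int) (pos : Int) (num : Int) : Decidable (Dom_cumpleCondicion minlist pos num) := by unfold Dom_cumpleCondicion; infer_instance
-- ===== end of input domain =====

-- B replaces A's linear scan with a direct guarded index access (same return value).


-- ===== PORT A =====
-- loop of A: i scans from 0; band becomes True when minlist[i]==num and i==pos
def cumpleCondicionLoop (minlist : List Int) (pos : Int) (num : Int) (i : Nat) : Bool :=
  if i < minlist.length then
    if minlist.getD i 0 == num && (i : Int) == pos then true
    else cumpleCondicionLoop minlist pos num (i + 1)
  else false
termination_by minlist.length - i

def cumpleCondicion (minlist : List Int) (pos : Int) (num : Int) : Bool :=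
  cumpleCondicionLoop minlist pos num 0

-- ===== PORT B =====
def cumpleCondicion_alt (minlist : List Int) (pos : Int) (num : Int) : Bool :=
  decide (0 ≤ pos) && decide (pos < (minlist.length : Int)) && (minlist.getD pos.toNat 0 == num)

-- ===== PRECONDITION & SPEC =====
def Spec_cumpleCondicion (minlist : List Int) (pos : Int) (num : Int) (out : Bool) : Prop := out = cumpleCondicion_alt minlist pos num
instance (minlist : List Int) (pos : Int) (num : Int) (out : Bool) : Decidable (Spec_cumpleCondicion minlist pos num out) := by unfold Spec_cumpleCondicion; infer_instance

-- ===== CLAIM (what is proved, stated in full; the proofs are below) =====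
def Claim_equal_cumpleCondicion : Prop := ∀ (minlist : List Int) (pos : Int) (num : Int), Dom_cumpleCondicion minlist pos num → Spec_cumpleCondicion minlist pos num (cumpleCondicion minlist pos num)

-- ===== LEMMAS AND PROOFS =====

-- ===== VERDICT (by name: the statement is the Claim_ definition above) =====
lemma loop_char (minlist : List Int) (pos num : Int) (i : Nat) :
    cumpleCondicionLoop minlist pos num i =
      (decide ((i : Int) ≤ pos) && decide (pos < (minlist.length : Int)) &&
        (minlist.getD pos.toNat 0 == num)) := by
  fun_induction cumpleCondicionLoop minlist pos num i with
  | case1 i hlt hb =>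
    simp only [beq_iff_eq, Bool.and_eq_true, decide_eq_true_eq] at hb
    have hip : (i : Int) = pos := hb.2
    have ht : pos.toNat = i := by omega
    have hlt' : pos < (minlist.length : Int) := by omega
    simp_all [List.getD]
  | case2 i hlt hb ih =>
    rw [ih]
    simp only [beq_iff_eq, Bool.and_eq_true, decide_eq_true_eq, not_and] at hb
    by_cases hp : (i : Int) = pos
    · subst hp
      have hne : minlist.getD i 0 ≠ num := fun h => hb h rfl
      simp only [List.getD] at hne
      simp [hne]
    · have h1 : ((i : Int) ≤ pos) ↔ ((i : Int) + 1 ≤ pos) := by omega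
      simp [h1]
  | case3 i hge =>
    have : ¬ (pos < (minlist.length : Int) ∧ (i:Int) ≤ pos) := by omega
    by_cases h1 : pos < (minlist.length : Int) <;> by_cases h2 : (i:Int) ≤ pos <;> simp_all

theorem cumpleCondicion_spec : Claim_equal_cumpleCondicion := by
  intro minlist pos num _
  unfold Spec_cumpleCondicion cumpleCondicion cumpleCondicion_alt
  rw [loop_char]
  norm_num
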